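-- pv_equiv track=rewrite | github.com/njonsson/dotfiles | resources/confluence2md/utils.py | add_prefix_to_lines
-- ===== SOURCE A (Python) =====
-- from typing import Iterable, List, Optional
--
-- def add_prefix_to_lines(text: str, first_prefix: str, other_prefix: str) -> str:
--     lines = text.split("\n")
--     if not lines:
--         return first_prefix.rstrip()
--     result: List[str] = []
--     for index, line in enumerate(lines):
--         prefix = first_prefix if index == 0 else other_prefix
--         result.append(prefix + line)
--     return "\n".join(result)
-- ===== SOURCE B (Python) =====
-- def add_prefix_to_lines(text: str, first_prefix: str, other_prefix: str) -> str:
--     return first_prefix + text.replace("\n", "\n" + other_prefix)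
-- ===== Notes on version B (the rewrite author's own statement) =====
-- stated objective: simpler
-- what changed: Replaces the split/enumerate-loop/join construction with a single string substitution: prepend first_prefix once and insert other_prefix after every newline via text.replace, with no list, loop or index (the dead 'if not lines' branch disappears).
import Mathlib
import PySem

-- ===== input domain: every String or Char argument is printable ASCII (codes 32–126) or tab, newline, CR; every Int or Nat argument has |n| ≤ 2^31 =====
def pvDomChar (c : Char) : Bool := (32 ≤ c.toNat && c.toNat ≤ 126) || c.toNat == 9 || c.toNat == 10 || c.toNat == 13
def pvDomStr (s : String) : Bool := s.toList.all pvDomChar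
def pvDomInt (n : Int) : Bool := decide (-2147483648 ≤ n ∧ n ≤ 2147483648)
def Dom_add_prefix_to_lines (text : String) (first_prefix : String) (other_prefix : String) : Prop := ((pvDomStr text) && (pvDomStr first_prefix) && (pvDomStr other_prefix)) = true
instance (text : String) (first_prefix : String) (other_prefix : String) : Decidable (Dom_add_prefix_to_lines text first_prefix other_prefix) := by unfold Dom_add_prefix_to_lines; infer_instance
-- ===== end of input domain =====

-- B replaces A's split/enumerate-loop/join construction by a single string substitution
-- (first_prefix + text.replace("\n", "\n" + other_prefix)); objective: simpler.


-- ===== PORT A =====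
-- text.split("\n") with the literal separator "\n" ≠ "" never raises, so split? is always `some`;
-- .getD [] only discharges the Option.
def add_prefix_to_lines (text : String) (first_prefix : String) (other_prefix : String) : String :=
  let lines : List String := (PySem.Str.split? text "\n").getD []
  if lines.isEmpty then PySem.Str.rstrip first_prefix
  else
    let result : List String :=
      (PySem.List.enumerate lines).foldl
        (fun res p => res ++ [(if p.1 = 0 then first_prefix else other_prefix) ++ p.2]) []
    PySem.Str.join "\n" result

-- ===== PORT B =====
def add_prefix_to_lines_alt (text : String) (first_prefix : String) (other_prefix : String) : String :=
  first_prefix ++ PySem.Str.replace text "\n" ("\n" ++ other_prefix)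

-- ===== PRECONDITION & SPEC =====
def Spec_add_prefix_to_lines (text : String) (first_prefix : String) (other_prefix : String) (out : String) : Prop := out = add_prefix_to_lines_alt text first_prefix other_prefix
instance (text : String) (first_prefix : String) (other_prefix : String) (out : String) : Decidable (Spec_add_prefix_to_lines text first_prefix other_prefix out) := by unfold Spec_add_prefix_to_lines; infer_instance

-- ===== CLAIM (what is proved, stated in full; the proofs are below) =====
def Claim_equal_add_prefix_to_lines : Prop := ∀ (text : String) (first_prefix : String) (other_prefix : String), Dom_add_prefix_to_lines text first_prefix other_prefix → Spec_add_prefix_to_lines text first_prefix other_prefix (add_prefix_to_lines text first_prefix other_prefix)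

-- ===== LEMMAS AND PROOFS =====

-- prepend a char to the first piece of a non-empty list of pieces
def pvCons (c : Char) : List (List Char) → List (List Char)
  | [] => [[c]]
  | p :: ps => (c :: p) :: ps

-- clean structural recursion computing Python's s.split(old) (old ≠ [])
def pvSplit (old : List Char) : List Char → List (List Char)
  | [] => [[]]
  | c :: t =>
    if old.isPrefixOf (c :: t) ∧ old ≠ [] then
      [] :: pvSplit old (List.drop old.length (c :: t))
    else
      pvCons c (pvSplit old t)
termination_by l => l.length
decreasing_by
  · rename_i hcond
    have : 1 ≤ old.length := List.length_pos_iff.mpr hcond.2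
    simp [List.length_drop]; omega
  · simp

lemma pvSplit_ne_nil (old l : List Char) : pvSplit old l ≠ [] := by
  induction l using pvSplit.induct old with
  | case1 => simp [pvSplit]
  | case2 c t h ih => rw [pvSplit]; simp [h]
  | case3 c t h ih =>
      rw [pvSplit]; rw [if_neg h]
      cases hp : pvSplit old t <;> simp [pvCons]

lemma splitOn_go_eq (old : List Char) (hold : old ≠ []) :
    ∀ (fuel : Nat) (l cur : List Char) (accs : List (List Char)),
      l.length < fuel →
      PySem.Chars.splitOn.go old fuel l cur accs
        = accs.reverse ++ (match pvSplit old l with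
            | [] => []
            | p :: ps => (cur.reverse ++ p) :: ps) := by
  intro fuel
  induction fuel with
  | zero => intro l cur accs h; omega
  | succ n ih =>
      intro l cur accs h
      match l with
      | [] =>
          simp [PySem.Chars.splitOn.go, pvSplit]
      | c :: t =>
          rw [PySem.Chars.splitOn.go]
          by_cases hp : old.isPrefixOf (c :: t)
          · rw [if_pos hp]
            have hlen : 1 ≤ old.length := List.length_pos_iff.mpr hold
            have hdrop : (List.drop old.length (c :: t)).length < n := by
              simp at h ⊢; omega
            rw [ih (List.drop old.length (c :: t)) [] (cur.reverse :: accs) hdrop]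
            rw [pvSplit, if_pos ⟨hp, hold⟩]
            cases hq : pvSplit old (List.drop old.length (c :: t)) with
            | nil => exact absurd hq (pvSplit_ne_nil _ _)
            | cons p ps => simp
          · rw [if_neg hp]
            have ht : t.length < n := by simp at h; omega
            rw [ih t (c :: cur) accs ht]
            rw [pvSplit, if_neg (by simp [hp])]
            cases hq : pvSplit old t with
            | nil => exact absurd hq (pvSplit_ne_nil _ _)
            | cons p ps => simp [pvCons]

lemma splitOn_eq (old l : List Char) (hold : old ≠ []) :
    PySem.Chars.splitOn l old = pvSplit old l := by
  rw [PySem.Chars.splitOn, splitOn_go_eq old hold (l.length + 1) l [] [] (by omega)]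
  cases hq : pvSplit old l with
  | nil => exact absurd hq (pvSplit_ne_nil _ _)
  | cons p ps => simp

lemma join_pvCons (sep : List Char) (c : Char) (r : List (List Char)) (hr : r ≠ []) :
    PySem.Chars.join sep (pvCons c r) = c :: PySem.Chars.join sep r := by
  cases r with
  | nil => exact absurd rfl hr
  | cons p ps =>
      cases ps with
      | nil => simp [pvCons, PySem.Chars.join_singleton]
      | cons q qs => simp [pvCons, PySem.Chars.join_cons_cons]

lemma replace_go_eq (old new : List Char) (hold : old ≠ []) :
    ∀ (fuel : Nat) (l acc : List Char),
      l.length ≤ fuel →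
      PySem.Chars.replace.go old new fuel l acc
        = acc.reverse ++ PySem.Chars.join new (pvSplit old l) := by
  intro fuel
  induction fuel with
  | zero =>
      intro l acc h
      have : l = [] := List.length_eq_zero_iff.mp (by omega)
      subst this
      simp [PySem.Chars.replace.go, pvSplit, PySem.Chars.join_singleton]
  | succ n ih =>
      intro l acc h
      match l with
      | [] => simp [PySem.Chars.replace.go, pvSplit, PySem.Chars.join_singleton]
      | c :: t =>
          rw [PySem.Chars.replace.go]
          by_cases hp : old.isPrefixOf (c :: t)
          · rw [if_pos hp]
            have hlen : 1 ≤ old.length := List.length_pos_iff.mpr hold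
            have hdrop : (List.drop old.length (c :: t)).length ≤ n := by
              simp at h ⊢; omega
            rw [ih (List.drop old.length (c :: t)) (new.reverse ++ acc) hdrop]
            rw [pvSplit, if_pos ⟨hp, hold⟩]
            cases hq : pvSplit old (List.drop old.length (c :: t)) with
            | nil => exact absurd hq (pvSplit_ne_nil _ _)
            | cons p ps =>
                cases ps with
                | nil => simp [PySem.Chars.join_singleton, PySem.Chars.join_cons_cons]
                | cons q qs => simp [PySem.Chars.join_cons_cons]
          · rw [if_neg hp]
            have ht : t.length ≤ n := by simp at h; omega
            rw [ih t (c :: acc) ht]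
            rw [pvSplit, if_neg (by simp [hp])]
            rw [join_pvCons new c _ (pvSplit_ne_nil _ _)]
            simp

lemma replace_eq (old new l : List Char) (hold : old ≠ []) :
    PySem.Chars.replace l old new = PySem.Chars.join new (pvSplit old l) := by
  rw [PySem.Chars.replace, if_neg (by simp [List.isEmpty_iff, hold])]
  exact replace_go_eq old new hold l.length l [] le_rfl

-- the loop over enumerate with index ≥ 1 only ever uses other_prefix
lemma foldl_enum_tail (f o : String) :
    ∀ (xs : List String) (i : Int) (acc : List String), 1 ≤ i →
      (PySem.List.enumerate xs i).foldl
          (fun res p => res ++ [(if p.1 = 0 then f else o) ++ p.2]) acc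
        = acc ++ xs.map (o ++ ·) := by
  intro xs
  induction xs with
  | nil => intro i acc hi; simp [PySem.List.enumerate]
  | cons x t ih =>
      intro i acc hi
      rw [PySem.List.enumerate_cons]
      simp only [List.foldl_cons]
      rw [if_neg (by omega)]
      rw [ih (i + 1) _ (by omega)]
      simp

-- joining prefixed lines with "\n" = first prefix ++ joining raw lines with "\n"+other
lemma join_prefixed (nl o : List Char) :
    ∀ (ps : List (List Char)) (f p : List Char),
      PySem.Chars.join nl ((f ++ p) :: ps.map (o ++ ·))
        = f ++ PySem.Chars.join (nl ++ o) (p :: ps) := by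
  intro ps
  induction ps with
  | nil => intro f p; simp [PySem.Chars.join_singleton]
  | cons q qs ih =>
      intro f p
      simp only [List.map_cons]
      rw [PySem.Chars.join_cons_cons, ih o q, PySem.Chars.join_cons_cons]
      simp

-- ===== VERDICT (by name: the statement is the Claim_ definition above) =====
theorem add_prefix_to_lines_spec : Claim_equal_add_prefix_to_lines := by
  intro text f o _
  unfold Spec_add_prefix_to_lines add_prefix_to_lines add_prefix_to_lines_alt
  have hnl : ("\n" : String).toList = ['\n'] := rfl
  have hsplit : PySem.Str.split? text "\n"
      = some (List.map String.ofList (pvSplit ['\n'] text.toList)) := by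
    rw [PySem.Str.split?, PySem.Chars.split?]
    rw [if_neg (by simp [hnl])]
    rw [hnl, splitOn_eq ['\n'] text.toList (by simp)]
    simp
  rw [hsplit]
  simp only [Option.getD_some]
  cases hq : pvSplit ['\n'] text.toList with
  | nil => exact absurd hq (pvSplit_ne_nil _ _)
  | cons p ps =>
      rw [if_neg (by simp)]
      simp only [List.map_cons]
      rw [PySem.List.enumerate_cons]
      simp only [List.foldl_cons]
      simp only [if_true]
      simp only [zero_add]
      rw [foldl_enum_tail f o (List.map String.ofList ps) 1 _ le_rfl]
      -- both sides as ofList of char-level values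
      have hB : (f ++ PySem.Str.replace text "\n" ("\n" ++ o))
          = String.ofList (f.toList ++ PySem.Chars.join ('\n' :: o.toList) (p :: ps)) := by
        rw [PySem.Str.replace]
        have : ("\n" ++ o).toList = '\n' :: o.toList := by simp [hnl]
        rw [hnl, this, replace_eq ['\n'] ('\n' :: o.toList) text.toList (by simp), hq]
        rw [String.ofList_append, String.ofList_toList]
      rw [hB]
      rw [PySem.Str.join]
      congr 1
      have hmap : List.map String.toList
          (([] ++ [f ++ String.ofList p]) ++ (List.map String.ofList ps).map (o ++ ·))
          = (f.toList ++ p) :: ps.map (o.toList ++ ·) := by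
        simp [Function.comp]
      rw [hmap, hnl, join_prefixed ['\n'] o.toList ps f.toList p]
      rfl
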